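-- pv_equiv track=rewrite | github.com/Ran4/dd1331-public | ex05/rabbits.py | count_rabbits_at_position
-- ===== SOURCE A (Python) =====
-- RABBIT = "*"
--
-- def count_rabbits_at_position(rabbits, position):
--     if position < 0 or position >= len(rabbits):
--         return 0
--     else:
--         left_side = rabbits[:position]
--         right_side = rabbits[position+1:]
--
--         left_count =  count_rabbits_at_position(left_side, len(left_side)-1)
--         right_count =  count_rabbits_at_position(right_side, 0)
--         middle_count = 1 if rabbits[position] == RABBIT else 0
--
--         count = left_count + middle_count + right_count
--         return count
-- ===== SOURCE B (Python) =====
-- RABBIT = "*"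
--
-- def count_rabbits_at_position(rabbits, position):
--     if position < 0 or position >= len(rabbits):
--         return 0
--     count = 0
--     for ch in rabbits:
--         if ch == RABBIT:
--             count += 1
--     return count
-- ===== Notes on version B (the rewrite author's own statement) =====
-- stated objective: faster
-- what changed: Replaces A's recursive split-around-position (which slices the string on every call) with one iterative pass over the string incrementing a counter.
import Mathlib
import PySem

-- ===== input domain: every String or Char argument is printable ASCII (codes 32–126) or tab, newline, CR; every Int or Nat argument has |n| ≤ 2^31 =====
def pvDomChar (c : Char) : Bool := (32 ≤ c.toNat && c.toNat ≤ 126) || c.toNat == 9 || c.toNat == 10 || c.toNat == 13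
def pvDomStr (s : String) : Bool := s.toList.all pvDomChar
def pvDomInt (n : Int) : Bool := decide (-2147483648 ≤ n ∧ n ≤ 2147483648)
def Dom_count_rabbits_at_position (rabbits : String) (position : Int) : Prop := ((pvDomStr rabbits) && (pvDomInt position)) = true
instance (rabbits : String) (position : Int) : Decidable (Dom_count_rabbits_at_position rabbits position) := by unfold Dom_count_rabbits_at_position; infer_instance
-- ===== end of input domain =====

-- ===== PORT A =====
-- B rewrites A's recursive split-around-position into a single iterative pass (faster).
-- pvA is the literal transliteration of A's recursion, over the string's code points.
def pvA (l : List Char) (position : Int) : Int :=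
  if h : position < 0 ∨ (l.length : Int) ≤ position then 0
  else
    let left_side := PySem.List.slice l none (some position)
    let right_side := PySem.List.slice l (some (position + 1)) none
    let left_count := pvA left_side ((left_side.length : Int) - 1)
    let right_count := pvA right_side 0
    let middle_count : Int := if PySem.List.pyGetD l position ' ' = '*' then 1 else 0
    left_count + middle_count + right_count
termination_by l.length
decreasing_by
  · push_neg at h
    rw [PySem.List.slice_to l h.1]
    simp [List.length_take]
    omega
  · push_neg at h
    rw [PySem.List.slice_from l (by omega : (0:Int) ≤ position + 1)]
    simp [List.length_drop]
    omega

def count_rabbits_at_position (rabbits : String) (position : Int) : Int :=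
  pvA rabbits.toList position

-- ===== PORT B =====
def count_rabbits_at_position_alt (rabbits : String) (position : Int) : Int :=
  if position < 0 ∨ (rabbits.toList.length : Int) ≤ position then 0
  else rabbits.toList.foldl (fun c ch => if ch == '*' then c + 1 else c) 0

-- ===== PRECONDITION & SPEC =====
def Spec_count_rabbits_at_position (rabbits : String) (position : Int) (out : Int) : Prop := out = count_rabbits_at_position_alt rabbits position
instance (rabbits : String) (position : Int) (out : Int) : Decidable (Spec_count_rabbits_at_position rabbits position out) := by unfold Spec_count_rabbits_at_position; infer_instance

-- ===== CLAIM (what is proved, stated in full; the proofs are below) =====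
def Claim_equal_count_rabbits_at_position : Prop := ∀ (rabbits : String) (position : Int), Dom_count_rabbits_at_position rabbits position → Spec_count_rabbits_at_position rabbits position (count_rabbits_at_position rabbits position)

-- ===== LEMMAS AND PROOFS =====

-- A's recursion computes: count of '*' in the whole list when the position is valid, else 0.
theorem pvA_eq (n : Nat) (l : List Char) (p : Int) (hn : l.length ≤ n) :
    pvA l p = if 0 ≤ p ∧ p < (l.length : Int) then (l.count '*' : Int) else 0 := by
  induction n generalizing l p with
  | zero =>
    rw [pvA, dif_pos (by omega : p < 0 ∨ (l.length : Int) ≤ p),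
        if_neg (by omega : ¬ (0 ≤ p ∧ p < (l.length : Int)))]
  | succ m IH =>
    by_cases h : p < 0 ∨ (l.length : Int) ≤ p
    · rw [pvA, dif_pos h, if_neg (by omega)]
    · push_neg at h
      obtain ⟨h0, hlt⟩ := h
      obtain ⟨k, rfl⟩ : ∃ k : Nat, p = (k : Int) := ⟨p.toNat, by omega⟩
      have hklen : k < l.length := by omega
      rw [pvA, dif_neg (by omega : ¬ ((k:Int) < 0 ∨ (l.length : Int) ≤ (k:Int)))]
      show pvA (PySem.List.slice l none (some (k:Int)))
              (((PySem.List.slice l none (some (k:Int))).length : Int) - 1)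
            + (if PySem.List.pyGetD l (k:Int) ' ' = '*' then 1 else 0)
            + pvA (PySem.List.slice l (some ((k:Int) + 1)) none) 0 = _
      rw [PySem.List.slice_to_natCast,
          show ((k:Int) + 1) = (((k+1 : Nat)) : Int) by push_cast; ring,
          PySem.List.slice_from_natCast]
      have htake : (l.take k).length = k := by simp [List.length_take]; omega
      have hdrop : (l.drop (k+1)).length = l.length - (k+1) := by simp [List.length_drop]
      rw [IH (l.take k) _ (by omega), IH (l.drop (k+1)) _ (by omega),
          PySem.List.pyGetD_natCast, htake, hdrop]
      have hdec : l = l.take k ++ l[k] :: l.drop (k+1) := by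
        conv_lhs => rw [← List.take_append_drop k l]
        rw [List.drop_eq_getElem_cons hklen]
      have hcount : (l.count '*' : Int)
          = ((l.take k).count '*' : Int) + (if l[k] = '*' then 1 else 0)
            + ((l.drop (k+1)).count '*' : Int) := by
        conv_lhs => rw [hdec]
        rw [List.count_append, List.count_cons]
        by_cases hc : l[k] = '*' <;> simp [hc, beq_iff_eq] <;> push_cast <;> ring
      have hleft : (if 0 ≤ (k:Int) - 1 ∧ (k:Int) - 1 < (k:Int)
            then ((l.take k).count '*' : Int) else 0) = ((l.take k).count '*' : Int) := by
        by_cases hz : k = 0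
        · subst hz; simp
        · rw [if_pos (by omega)]
      have hright : (if 0 ≤ (0:Int) ∧ (0:Int) < ((l.length - (k+1) : Nat) : Int)
            then ((l.drop (k+1)).count '*' : Int) else 0) = ((l.drop (k+1)).count '*' : Int) := by
        by_cases hr : l.length = k + 1
        · have hnil : l.drop (k+1) = [] := by
            apply List.eq_nil_of_length_eq_zero
            rw [hdrop, hr]; omega
          simp [hnil, hr]
        · rw [if_pos (by constructor; omega; push_cast; omega)]
      rw [hleft, hright, if_pos (by constructor <;> omega : 0 ≤ (k:Int) ∧ (k:Int) < (l.length : Int)), hcount,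
          List.getD_eq_getElem l ' ' hklen]

theorem count_rabbits_at_position_spec : Claim_equal_count_rabbits_at_position := by
  intro rabbits position _
  unfold Spec_count_rabbits_at_position count_rabbits_at_position count_rabbits_at_position_alt
  rw [pvA_eq rabbits.toList.length _ _ le_rfl]
  by_cases h : position < 0 ∨ (rabbits.toList.length : Int) ≤ position
  · rw [if_neg (by omega : ¬ (0 ≤ position ∧ position < (rabbits.toList.length : Int))), if_pos h]
  · push_neg at h
    rw [if_pos (by omega : 0 ≤ position ∧ position < (rabbits.toList.length : Int)), if_neg (by omega)]
    rw [PySem.List.foldl_beq_add_one]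
    ring
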